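-- pv_equiv track=rewrite | github.com/dannesx/controle-horas | ui/monthly_view.py | _shift_month
-- ===== SOURCE A (Python) =====
-- def _shift_month(year: int, month: int, delta: int) -> tuple[int, int]:
--     shifted = month + delta
--     while shifted < 1:
--         shifted += 12
--         year -= 1
--     while shifted > 12:
--         shifted -= 12
--         year += 1
--     return year, shifted
-- ===== SOURCE B (Python) =====
-- def _shift_month(year: int, month: int, delta: int) -> tuple[int, int]:
--     total = (month - 1) + delta
--     return year + total // 12, total % 12 + 1
-- ===== Notes on version B (the rewrite author's own statement) =====
-- stated objective: simpler
-- what changed: Replaces the two normalising while-loops with a closed-form floor divmod on the zero-based month index.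
import Mathlib
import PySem

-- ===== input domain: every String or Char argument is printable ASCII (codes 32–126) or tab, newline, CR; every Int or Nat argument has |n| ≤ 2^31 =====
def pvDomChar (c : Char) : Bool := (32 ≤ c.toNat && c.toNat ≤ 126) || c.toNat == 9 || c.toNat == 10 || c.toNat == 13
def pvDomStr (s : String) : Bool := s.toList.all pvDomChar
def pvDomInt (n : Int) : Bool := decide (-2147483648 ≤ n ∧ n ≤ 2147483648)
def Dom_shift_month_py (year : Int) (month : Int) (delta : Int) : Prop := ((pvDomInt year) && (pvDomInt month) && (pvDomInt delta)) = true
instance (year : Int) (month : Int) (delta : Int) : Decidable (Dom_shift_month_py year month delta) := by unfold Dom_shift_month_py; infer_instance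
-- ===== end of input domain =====

-- B replaces A's two normalising while-loops with a single closed-form floor divmod (simpler).


-- ===== PORT A =====
-- loop 'while shifted < 1: shifted += 12; year -= 1'
def pvLoopUnder (year : Int) (shifted : Int) : Int × Int :=
  if shifted < 1 then pvLoopUnder (year - 1) (shifted + 12) else (year, shifted)
termination_by (1 - shifted).toNat
decreasing_by omega

-- loop 'while shifted > 12: shifted -= 12; year += 1'
def pvLoopOver (year : Int) (shifted : Int) : Int × Int :=
  if shifted > 12 then pvLoopOver (year + 1) (shifted - 12) else (year, shifted)
termination_by (shifted - 12).toNat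
decreasing_by omega

def shift_month_py (year : Int) (month : Int) (delta : Int) : Int × Int :=
  let shifted := month + delta
  let p := pvLoopUnder year shifted
  pvLoopOver p.1 p.2

-- ===== PORT B =====
def shift_month_py_alt (year : Int) (month : Int) (delta : Int) : Int × Int :=
  let total := (month - 1) + delta
  (year + PySem.Int.floordiv total 12, PySem.Int.mod total 12 + 1)

-- ===== PRECONDITION & SPEC =====
def Spec_shift_month_py (year : Int) (month : Int) (delta : Int) (out : Int × Int) : Prop := out = shift_month_py_alt year month delta
instance (year : Int) (month : Int) (delta : Int) (out : Int × Int) : Decidable (Spec_shift_month_py year month delta out) := by unfold Spec_shift_month_py; infer_instance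

-- ===== CLAIM (what is proved, stated in full; the proofs are below) =====
def Claim_equal_shift_month_py : Prop := ∀ (year : Int) (month : Int) (delta : Int), Dom_shift_month_py year month delta → Spec_shift_month_py year month delta (shift_month_py year month delta)

-- ===== LEMMAS AND PROOFS =====

-- the under-loop, run on any shifted ≤ 12, lands on the closed form
theorem pvLoopUnder_closed (year shifted : Int) (h : shifted ≤ 12) :
    pvLoopUnder year shifted = (year + (shifted - 1) / 12, (shifted - 1) % 12 + 1) := by
  by_cases hlt : shifted < 1
  · rw [pvLoopUnder, if_pos hlt, pvLoopUnder_closed (year - 1) (shifted + 12) (by omega)]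
    refine Prod.ext ?_ ?_ <;> simp <;> omega
  · rw [pvLoopUnder, if_neg hlt]
    refine Prod.ext ?_ ?_ <;> simp <;> omega
termination_by (1 - shifted).toNat
decreasing_by omega

-- the over-loop, run on any shifted ≥ 1, lands on the closed form
theorem pvLoopOver_closed (year shifted : Int) (h : 1 ≤ shifted) :
    pvLoopOver year shifted = (year + (shifted - 1) / 12, (shifted - 1) % 12 + 1) := by
  by_cases hgt : shifted > 12
  · rw [pvLoopOver, if_pos hgt, pvLoopOver_closed (year + 1) (shifted - 12) (by omega)]
    refine Prod.ext ?_ ?_ <;> simp <;> omega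
  · rw [pvLoopOver, if_neg hgt]
    refine Prod.ext ?_ ?_ <;> simp <;> omega
termination_by (shifted - 12).toNat
decreasing_by omega

-- ===== VERDICT (by name: the statement is the Claim_ definition above) =====
theorem shift_month_py_spec : Claim_equal_shift_month_py := by
  intro year month delta _
  unfold Spec_shift_month_py
  simp only [shift_month_py, shift_month_py_alt,
    @PySem.Int.floordiv_eq_ediv_of_pos (month - 1 + delta) 12 (by norm_num),
    @PySem.Int.mod_eq_emod_of_pos (month - 1 + delta) 12 (by norm_num)]
  by_cases h : month + delta ≤ 12
  · rw [pvLoopUnder_closed year (month + delta) h, pvLoopOver_closed _ _ (by omega)]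
    refine Prod.ext ?_ ?_ <;> simp <;> omega
  · rw [pvLoopUnder, if_neg (by omega), pvLoopOver_closed year (month + delta) (by omega)]
    refine Prod.ext ?_ ?_ <;> simp <;> omega
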